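-- pv_equiv track=rewrite | github.com/XuanQuang1301/CODE_PTIT | PYTHON/PY01039 - KIỂM TRA SỐ ĐẸP.py | check
-- ===== SOURCE A (Python) =====
-- def check(s):
--     tmp = set()
--     for i in range(len(s) - 2):
--         if len(tmp) > 2:
--             return False
--         if s[i] != s[i + 2]:
--             return False
--         tmp.add(s[i])
--     return True
-- ===== SOURCE B (Python) =====
-- def check(s):
--     evens = {c for i, c in enumerate(s) if i % 2 == 0}
--     odds = {c for i, c in enumerate(s) if i % 2 != 0}
--     return len(evens) <= 1 and len(odds) <= 1
-- ===== Notes on version B (the rewrite author's own statement) =====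
-- stated objective: simpler
-- what changed: B drops A's pairwise s[i]==s[i+2] scan with early exit and its seen-set guard entirely: it partitions the characters by index parity into two sets and accepts iff each parity class contains at most one distinct character.
import Mathlib
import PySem

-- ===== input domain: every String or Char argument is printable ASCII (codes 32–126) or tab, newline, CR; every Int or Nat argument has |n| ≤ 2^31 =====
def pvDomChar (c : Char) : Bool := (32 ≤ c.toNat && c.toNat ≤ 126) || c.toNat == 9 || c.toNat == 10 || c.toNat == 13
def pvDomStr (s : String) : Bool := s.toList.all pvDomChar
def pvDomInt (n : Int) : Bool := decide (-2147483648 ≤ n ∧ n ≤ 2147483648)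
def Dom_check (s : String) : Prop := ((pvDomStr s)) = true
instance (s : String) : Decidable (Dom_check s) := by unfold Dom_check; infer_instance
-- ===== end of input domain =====

-- B replaces A's pairwise s[i]==s[i+2] scan (with early exit and a seen-set guard) by
-- partitioning the characters by index parity into two sets and checking each set has
-- at most one element; objective: simpler.

-- ===== PORT A =====
-- the loop 'for i in range(len(s)-2)' reads s[i] and s[i+2]; ported as the structural
-- recursion over the suffix whose first and third elements are exactly s[i] and s[i+2]
def checkGo : List Char → PySem.Set Char → Bool
  | a :: b :: c :: rest, tmp =>
    if tmp.length > 2 then false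
    else if a ≠ c then false
    else checkGo (b :: c :: rest) (PySem.Set.add tmp a)
  | _, _ => true

def check (s : String) : Bool := checkGo s.toList (PySem.Set.ofList [])

-- ===== PORT B =====
-- evens = {c for i, c in enumerate(s) if i % 2 == 0};  odds likewise with i % 2 != 0;
-- return len(evens) <= 1 and len(odds) <= 1
def check_alt (s : String) : Bool :=
  let evens := PySem.Set.ofList
    (((PySem.List.enumerate s.toList).filter (fun p => PySem.Int.mod p.1 2 == 0)).map (·.2))
  let odds := PySem.Set.ofList
    (((PySem.List.enumerate s.toList).filter (fun p => !(PySem.Int.mod p.1 2 == 0))).map (·.2))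
  decide (evens.length ≤ 1) && decide (odds.length ≤ 1)

-- ===== PRECONDITION & SPEC =====
def Spec_check (s : String) (out : Bool) : Prop := out = check_alt s
instance (s : String) (out : Bool) : Decidable (Spec_check s out) := by unfold Spec_check; infer_instance

-- ===== CLAIM (what is proved, stated in full; the proofs are below) =====
def Claim_equal_check : Prop := ∀ (s : String), Dom_check s → Spec_check s (check s)

-- ===== LEMMAS AND PROOFS =====

-- the common characterisation: s is 2-periodic
def per2 : List Char → Bool
  | a :: b :: c :: rest => (decide (a = c)) && per2 (b :: c :: rest)
  | _ => true

def headMatch (o : Option Char) (cs : List Char) : Bool :=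
  match o, cs with
  | some e, x :: _ => decide (e = x)
  | _, _ => true

theorem per2_cons (c : Char) (rest : List Char) :
    per2 (c :: rest) = (headMatch (some c) rest.tail && per2 rest) := by
  rcases rest with _ | ⟨b, _ | ⟨d, r⟩⟩ <;> simp [per2, headMatch]

-- ------- A-side: checkGo computes per2 -------

theorem nodup_subset_pair (l : List Char) (a b : Char)
    (hn : l.Nodup) (hs : ∀ x ∈ l, x = a ∨ x = b) : l.length ≤ 2 := by
  rcases l with _ | ⟨x, _ | ⟨y, _ | ⟨z, t⟩⟩⟩
  · simp
  · simp
  · simp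
  · exfalso
    simp only [List.nodup_cons, List.mem_cons] at hn
    have hx := hs x (by simp)
    have hy := hs y (by simp)
    have hz := hs z (by simp)
    have hxy : x ≠ y := fun h => hn.1 (Or.inl h)
    have hxz : x ≠ z := fun h => hn.1 (Or.inr (Or.inl h))
    have hyz : y ≠ z := fun h => hn.2.1 (Or.inl h)
    rcases hx with rfl | rfl <;> rcases hy with rfl | rfl <;> rcases hz with rfl | rfl <;> simp_all

theorem nodup_add (l : List Char) (x : Char) (h : l.Nodup) : (PySem.Set.add l x).Nodup := by
  by_cases hx : x ∈ l
  · simpa [PySem.Set.add, PySem.Set.contains, hx] using h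
  · simp only [PySem.Set.add, PySem.Set.contains]
    rw [if_neg (by simpa using hx)]
    exact List.Nodup.append h (List.nodup_singleton x) (by simp [List.disjoint_singleton, hx])

theorem mem_add' (l : List Char) (x y : Char) (h : y ∈ PySem.Set.add l x) : y ∈ l ∨ y = x := by
  by_cases hx : x ∈ l
  · simp [PySem.Set.add, PySem.Set.contains, hx] at h; exact Or.inl h
  · simp [PySem.Set.add, PySem.Set.contains, hx] at h
    tauto

theorem checkGo_spec (cs : List Char) : ∀ tmp : PySem.Set Char, tmp.Nodup →
    (∀ x ∈ tmp, x ∈ cs.take 2) → checkGo cs tmp = per2 cs := by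
  induction cs with
  | nil => intro tmp _ _; rfl
  | cons a tl ih =>
    intro tmp hn hsub
    rcases tl with _ | ⟨b, _ | ⟨c, rest⟩⟩
    · rfl
    · rfl
    · have hlen : tmp.length ≤ 2 := by
        apply nodup_subset_pair tmp a b hn
        intro x hx
        have := hsub x hx
        simp [List.take] at this
        tauto
      by_cases hac : a = c
      · subst hac
        have hrec := ih (PySem.Set.add tmp a) (nodup_add tmp a hn) (by
          intro x hx
          rcases mem_add' tmp a x hx with hx' | rfl
          · have := hsub x hx'
            simp [List.take] at this ⊢
            tauto
          · simp [List.take])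
        simp [checkGo, per2, hrec, Nat.not_lt.mpr hlen]
      · simp [checkGo, per2, hac, Nat.not_lt.mpr hlen]

-- ------- B-side: the two parity classes and per2 -------

-- the characters at even positions
def evens : List Char → List Char
  | [] => []
  | [a] => [a]
  | a :: _ :: r => a :: evens r

theorem evens_cons (c : Char) (cs : List Char) : evens (c :: cs) = c :: evens cs.tail := by
  rcases cs with _ | ⟨b, r⟩ <;> simp [evens]

-- a list is constant (all its elements equal)
def constB : List Char → Bool
  | [] => true
  | a :: t => t.all (fun x => x == a)

theorem constB_iff (l : List Char) : constB l = true ↔ ∀ x ∈ l, ∀ y ∈ l, x = y := by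
  rcases l with _ | ⟨a, t⟩
  · simp [constB]
  · simp only [constB, List.all_eq_true, beq_iff_eq, List.mem_cons]
    constructor
    · intro h x hx y hy
      rcases hx with rfl | hx
      · rcases hy with rfl | hy
        · rfl
        · exact (h y hy).symm
      · rcases hy with rfl | hy
        · exact h x hx
        · rw [h x hx, h y hy]
    · intro h x hx; exact h x (Or.inr hx) a (Or.inl rfl)

-- pulling the head off a constant-check
theorem constB_cons (c : Char) (o : List Char) :
    constB (c :: o) = (headMatch (some c) o && constB o) := by
  rcases o with _ | ⟨x, t⟩
  · simp [constB, headMatch]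
  · by_cases hcx : c = x
    · subst hcx
      simp only [constB, headMatch, List.all_cons, beq_self_eq_true, Bool.true_and, decide_true]
    · simp only [constB, headMatch, List.all_cons]
      have : (x == c) = false := by simp [Ne.symm hcx]
      simp [this, hcx]

-- the parity-class formulation satisfies the same head recurrence as per2
theorem parity_cons (c : Char) (rest : List Char) :
    (constB (evens (c :: rest)) && constB (evens (c :: rest).tail)) =
      (headMatch (some c) rest.tail &&
        (constB (evens rest) && constB (evens rest.tail))) := by
  rw [List.tail_cons, evens_cons, constB_cons]
  have hm : headMatch (some c) (evens rest.tail) = headMatch (some c) rest.tail := by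
    rcases rest with _ | ⟨b, r⟩
    · rfl
    · rw [List.tail_cons]
      rcases r with _ | ⟨x, t⟩
      · rfl
      · rw [evens_cons]; rfl
  rw [hm]
  cases headMatch (some c) rest.tail <;> cases constB (evens rest) <;>
    cases constB (evens rest.tail) <;> rfl

theorem per2_eq_parity (cs : List Char) :
    per2 cs = (constB (evens cs) && constB (evens cs.tail)) := by
  induction cs with
  | nil => rfl
  | cons c rest ih => rw [per2_cons, parity_cons, ih]

-- the set of a list has at most one element iff the list is constant
theorem setLen_le_one (l : List Char) :
    decide ((PySem.Set.ofList l).length ≤ 1) = constB l := by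
  have h : (PySem.Set.ofList l).length ≤ 1 ↔ constB l = true := by
    rw [constB_iff]
    constructor
    · intro h x hx y hy
      have hx' := (PySem.Set.mem_ofList l x).mpr hx
      have hy' := (PySem.Set.mem_ofList l y).mpr hy
      rcases hs : PySem.Set.ofList l with _ | ⟨z, _ | ⟨w, t⟩⟩
      · simp [hs] at hx'
      · rw [hs] at hx' hy'; simp at hx' hy'; rw [hx', hy']
      · rw [hs] at h; simp at h
    · intro h
      rcases hs : PySem.Set.ofList l with _ | ⟨z, _ | ⟨w, t⟩⟩
      · simp
      · simp
      · exfalso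
        have hn := PySem.Set.nodup_ofList l
        rw [hs] at hn
        have hz : z ∈ l := (PySem.Set.mem_ofList l z).mp (by rw [hs]; simp)
        have hw : w ∈ l := (PySem.Set.mem_ofList l w).mp (by rw [hs]; simp)
        have := h z hz w hw
        simp [this] at hn
  rcases hb : constB l with _ | _
  · simp only [decide_eq_false_iff_not]
    intro hc; rw [hb] at h; exact absurd (h.mp hc) (by simp)
  · simp only [decide_eq_true_eq]; exact h.mpr hb

-- the even-index filter of enumerate collects exactly the even-position characters
-- (stated for an arbitrary start index n, whose parity alternates along the list)
theorem enumFilter (cs : List Char) : ∀ n : Nat,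
    (((PySem.List.enumerate cs (n : Int)).filter
        (fun p => PySem.Int.mod p.1 2 == 0)).map (·.2)) =
      (if n % 2 = 0 then evens cs else evens cs.tail) := by
  induction cs with
  | nil => intro n; simp [PySem.List.enumerate_nil, evens]
  | cons c rest ih =>
    intro n
    rw [PySem.List.enumerate_cons]
    have hmod : PySem.Int.mod (n : Int) 2 = ((n % 2 : Nat) : Int) := by
      exact_mod_cast PySem.Int.mod_natCast n 2
    have hsucc : ((n : Int) + 1) = ((n + 1 : Nat) : Int) := by push_cast; ring
    rcases Nat.even_or_odd n with he | ho
    · have h0 : n % 2 = 0 := Nat.even_iff.mp he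
      simp only [List.filter_cons, hmod, h0, Nat.cast_zero, beq_self_eq_true, if_true,
        List.map_cons]
      rw [hsucc, ih (n + 1), if_neg (by omega), evens_cons]
    · have h0 : n % 2 = 1 := Nat.odd_iff.mp ho
      have h1 : (n + 1) % 2 = 0 := by omega
      have hf : (((1 : Nat) : Int) == 0) = false := by decide
      simp only [List.filter_cons, hmod, h0, hf, Bool.false_eq_true, if_false]
      rw [hsucc, ih (n + 1), if_pos h1, if_neg (by omega), List.tail_cons]

-- the odd-index filter collects the complementary parity class
theorem enumFilterOdd (cs : List Char) : ∀ n : Nat,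
    (((PySem.List.enumerate cs (n : Int)).filter
        (fun p => !(PySem.Int.mod p.1 2 == 0))).map (·.2)) =
      (if n % 2 = 0 then evens cs.tail else evens cs) := by
  induction cs with
  | nil => intro n; simp [PySem.List.enumerate_nil, evens]
  | cons c rest ih =>
    intro n
    rw [PySem.List.enumerate_cons]
    have hmod : PySem.Int.mod (n : Int) 2 = ((n % 2 : Nat) : Int) := by
      exact_mod_cast PySem.Int.mod_natCast n 2
    have hsucc : ((n : Int) + 1) = ((n + 1 : Nat) : Int) := by push_cast; ring
    rcases Nat.even_or_odd n with he | ho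
    · have h0 : n % 2 = 0 := Nat.even_iff.mp he
      have hf : (!(((0 : Nat) : Int) == 0)) = false := by decide
      simp only [List.filter_cons, hmod, h0, hf, Bool.false_eq_true, if_false]
      rw [hsucc, ih (n + 1), if_neg (by omega)]; simp
    · have h0 : n % 2 = 1 := Nat.odd_iff.mp ho
      have h1 : (n + 1) % 2 = 0 := by omega
      have ht : (!(((1 : Nat) : Int) == 0)) = true := by decide
      simp only [List.filter_cons, hmod, h0, ht, if_true, List.map_cons]
      rw [hsucc, ih (n + 1), if_pos h1, if_neg (by omega), evens_cons]

theorem check_alt_eq_parity (s : String) :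
    check_alt s = (constB (evens s.toList) && constB (evens s.toList.tail)) := by
  have he := enumFilter s.toList 0
  have ho := enumFilterOdd s.toList 0
  simp only [Nat.cast_zero, Nat.zero_mod, if_true] at he ho
  simp only [check_alt]
  rw [he, ho, setLen_le_one, setLen_le_one]

-- ===== VERDICT (by name: the statement is the Claim_ definition above) =====
theorem check_spec : Claim_equal_check := by
  intro s _
  unfold Spec_check check
  rw [check_alt_eq_parity, ← per2_eq_parity,
    checkGo_spec s.toList (PySem.Set.ofList []) (by simp [PySem.Set.ofList]) (by simp [PySem.Set.ofList])]
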